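-- pv_equiv track=rewrite | github.com/stephen-huan/haar-wavelet | permute.py | naive_even_odd
-- ===== SOURCE A (Python) =====
-- from dataclasses import dataclass
--
-- def __builtin_ctz(v: int) -> int:
--     """Return the number of number of trailing zeros."""
--     return (v & -v).bit_length() - 1
--
-- @dataclass
-- class Opaque:
--     """An uninspectable filler object."""
--
--     value: int
--
-- def naive_even_odd(x: list[Opaque]) -> list[Opaque]:
--     """Apply the even-odd permutation to x."""
--     n = len(x)
--     assert n == 1 << __builtin_ctz(n), f"{n} is not a power of 2."
--     m = n - 1
--     p = list(x)
--     for i in range(n >> 1):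
--         p[i] = x[i << 1]
--     for i in range(n >> 1, n):
--         p[i] = x[((i << 1) | 1) & m]
--     return p
-- ===== SOURCE B (Python) =====
-- def __builtin_ctz(v: int) -> int:
--     """Return the number of number of trailing zeros."""
--     return (v & -v).bit_length() - 1
--
-- def naive_even_odd(x):
--     """Apply the even-odd permutation to x: one pass splitting into two buckets."""
--     n = len(x)
--     assert n == 1 << __builtin_ctz(n), f"{n} is not a power of 2."
--     evens, odds = [], []
--     for i, v in enumerate(x):
--         (evens if i % 2 == 0 else odds).append(v)
--     return evens + odds
-- ===== Notes on version B (the rewrite author's own statement) =====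
-- stated objective: simpler
-- what changed: Replaces A's two preallocated-write passes with bit-shift/mask index arithmetic by a single enumerate pass appending each element to an evens or odds bucket and concatenating the buckets.
import Mathlib
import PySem

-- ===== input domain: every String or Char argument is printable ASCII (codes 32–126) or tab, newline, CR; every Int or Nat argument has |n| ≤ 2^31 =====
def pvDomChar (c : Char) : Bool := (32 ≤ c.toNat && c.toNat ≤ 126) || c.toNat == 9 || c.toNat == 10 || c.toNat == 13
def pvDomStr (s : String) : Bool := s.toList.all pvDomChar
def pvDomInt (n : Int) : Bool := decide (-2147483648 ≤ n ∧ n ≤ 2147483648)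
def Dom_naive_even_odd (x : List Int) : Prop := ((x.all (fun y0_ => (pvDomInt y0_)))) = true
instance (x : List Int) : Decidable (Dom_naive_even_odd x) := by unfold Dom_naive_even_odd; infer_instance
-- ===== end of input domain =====

-- B replaces A's two preallocated-write passes (bit-shift/mask index arithmetic) by a single
-- enumerate pass appending each element to an evens or odds bucket, then concatenating (simpler).

-- ===== PORT A =====
-- Port of A's body. A's `assert n == 1 << __builtin_ctz(n)` raises exactly on lengths that are
-- not a power of 2 (ValueError from `1 << -1` for n = 0); those inputs are excluded by
-- Pre_naive_even_odd, so the port carries only the body after the assert. Inside Pre_ every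
-- index below is in range, so `getD _ 0` is exact for Python's x[...] (it never defaults).
def naive_even_odd (x : List Int) : List Int :=
  let n := x.length
  let m := n - 1
  let p := x                                                -- p = list(x)
  let p := (List.range (n >>> 1)).foldl
    (fun p i => p.set i (x.getD (i <<< 1) 0)) p             -- for i in range(n >> 1): p[i] = x[i << 1]
  (List.range' (n >>> 1) (n - (n >>> 1))).foldl
    (fun p i => p.set i (x.getD (((i <<< 1) ||| 1) &&& m) 0)) p
                                                            -- for i in range(n >> 1, n): p[i] = x[((i << 1) | 1) & m]

-- ===== PORT B =====
-- B keeps A's assert (same guard, raising on the same inputs); as in port A it is represented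
-- by Pre_naive_even_odd, so the port carries only the body after the assert.
def naive_even_odd_alt (x : List Int) : List Int :=
  let eo := (PySem.List.enumerate x).foldl
    (fun (acc : List Int × List Int) iv =>
      if PySem.Int.mod iv.1 2 == 0 then (acc.1 ++ [iv.2], acc.2) else (acc.1, acc.2 ++ [iv.2]))
    ([], [])
  eo.1 ++ eo.2

-- ===== PRECONDITION & SPEC =====
-- Pre_ excludes exactly the inputs on which A raises: lists whose length is not a power of 2
-- (A's assert fails there; on the empty list `1 << -1` raises ValueError).
def Pre_naive_even_odd (x : List Int) : Prop := ∃ k, k ≤ x.length ∧ x.length = 2 ^ k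
instance (x : List Int) : Decidable (Pre_naive_even_odd x) := by
  unfold Pre_naive_even_odd; infer_instance
def pvWitness_naive_even_odd : List Int := [3, 1, 4, 1]

def Spec_naive_even_odd (x : List Int) (out : List Int) : Prop := out = naive_even_odd_alt x
instance (x : List Int) (out : List Int) : Decidable (Spec_naive_even_odd x out) := by
  unfold Spec_naive_even_odd; infer_instance

-- ===== CLAIM (what is proved, stated in full; the proofs are below) =====
def Claim_equal_naive_even_odd : Prop :=
  ∀ (x : List Int), Dom_naive_even_odd x → Pre_naive_even_odd x →
    Spec_naive_even_odd x (naive_even_odd x)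

-- ===== LEMMAS AND PROOFS =====

-- The even-indexed and the odd-indexed elements of x.
def evensOf (x : List Int) : List Int :=
  (List.range ((x.length + 1) / 2)).map (fun i => x.getD (2 * i) 0)
def oddsOf (x : List Int) : List Int :=
  (List.range (x.length / 2)).map (fun i => x.getD (2 * i + 1) 0)

theorem evensOf_cons (a : Int) (t : List Int) : evensOf (a :: t) = a :: oddsOf t := by
  unfold evensOf oddsOf
  have h : (t.length + 1 + 1) / 2 = t.length / 2 + 1 := by omega
  rw [List.length_cons, h, List.range_succ_eq_map]
  simp [List.map_map, Function.comp, Nat.mul_succ]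

theorem oddsOf_cons (a : Int) (t : List Int) : oddsOf (a :: t) = evensOf t := by
  unfold evensOf oddsOf
  rw [List.length_cons]
  apply List.map_congr_left
  intro i _
  simp

-- B's single pass: the accumulators only grow on the right, and the bucket chosen
-- flips with the parity of the enumerate index.
theorem foldB (x : List Int) : ∀ (s : Int) (e o : List Int), 0 ≤ s →
    (PySem.List.enumerate x s).foldl
      (fun (acc : List Int × List Int) iv =>
        if PySem.Int.mod iv.1 2 == 0 then (acc.1 ++ [iv.2], acc.2) else (acc.1, acc.2 ++ [iv.2]))
      (e, o)
    = if s % 2 = 0 then (e ++ evensOf x, o ++ oddsOf x) else (e ++ oddsOf x, o ++ evensOf x) := by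
  induction x with
  | nil =>
    intro s e o hs
    simp [PySem.List.enumerate_nil, evensOf, oddsOf]
  | cons a t ih =>
    intro s e o hs
    rw [PySem.List.enumerate_cons, List.foldl_cons]
    by_cases hp : s % 2 = 0
    · rw [if_pos (by simp [hp]), ih (s+1) (e ++ [a]) o (by omega),
        if_neg (by omega), if_pos hp, evensOf_cons, oddsOf_cons]
      simp
    · rw [if_neg (by simp [hp]), ih (s+1) e (o ++ [a]) (by omega),
        if_pos (by omega), if_neg hp, evensOf_cons, oddsOf_cons]
      simp

theorem alt_eq (x : List Int) : naive_even_odd_alt x = evensOf x ++ oddsOf x := by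
  unfold naive_even_odd_alt
  rw [foldB x 0 [] [] (by omega), if_pos (by omega)]
  simp

-- A's first loop overwrites the prefix [0, k) in order.
theorem foldl_set_range (g : Nat → Int) :
    ∀ (k : Nat) (p : List Int), k ≤ p.length →
      (List.range k).foldl (fun p i => p.set i (g i)) p
        = (List.range k).map g ++ p.drop k := by
  intro k
  induction k with
  | zero => simp
  | succ k ih =>
    intro p hk
    rw [List.range_succ, List.foldl_append, List.foldl_cons, List.foldl_nil, ih p (by omega)]
    have hlen : ((List.range k).map g).length = k := by simp
    rw [List.set_append_right _ _ (by omega), List.map_append]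
    simp only [hlen]
    rw [List.drop_eq_getElem_cons (by omega), Nat.sub_self, List.set_cons_zero]
    simp

theorem set_take_succ (p : List Int) (s : Nat) (v : Int) (h : s < p.length) :
    (p.set s v).take (s + 1) = p.take s ++ [v] := by
  rw [List.take_set, List.take_add_one]
  have hl : (p.take s).length = s := by simp; omega
  rw [List.set_append_right _ _ (by omega), hl]
  simp [h]

-- A's second loop overwrites the slice [s, s+c) in order.
theorem foldl_set_range' (h : Nat → Int) :
    ∀ (c s : Nat) (p : List Int), s + c ≤ p.length →
      (List.range' s c).foldl (fun p i => p.set i (h i)) p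
        = p.take s ++ (List.range' s c).map h ++ p.drop (s + c) := by
  intro c
  induction c with
  | zero => intro s p hs; simp [List.take_append_drop]
  | succ c ih =>
    intro s p hs
    rw [List.range'_succ, List.foldl_cons, ih (s+1) (p.set s (h s)) (by simp; omega)]
    have h1 : (p.set s (h s)).take (s+1) = p.take s ++ [h s] :=
      set_take_succ p s (h s) (by omega)
    have h2 : (p.set s (h s)).drop (s+1+c) = p.drop (s+1+c) := by
      rw [List.drop_set]
      simp
      omega
    rw [h1, h2]
    have h3 : s + 1 + c = s + (c+1) := by omega
    simp [h3, List.append_assoc]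

theorem or_one (i : Nat) : i * 2 ||| 1 = i * 2 + 1 := by
  apply Nat.eq_of_testBit_eq
  intro j
  cases j with
  | zero => simp
  | succ k =>
    rw [Nat.testBit_succ, Nat.testBit_succ, Nat.or_div_two]
    have h1 : i * 2 / 2 ||| 1 / 2 = i := by simp
    have h2 : (i * 2 + 1) / 2 = i := by omega
    rw [h1, h2]

theorem A_eq (x : List Int) (k : Nat) (hn : x.length = 2 ^ k) :
    naive_even_odd x = evensOf x ++ oddsOf x := by
  cases k with
  | zero =>
    match x, (by simpa using hn : x.length = 1) with
    | [a], _ =>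
      show naive_even_odd [a] = evensOf [a] ++ oddsOf [a]
      simp [naive_even_odd, evensOf, oddsOf]
  | succ k =>
    unfold naive_even_odd
    dsimp only
    set n := x.length with hnx
    set M := 2 ^ k with hM
    have hn2 : n = 2 * M := by rw [hn, hM, pow_succ]; ring
    have hsr : n >>> 1 = M := by rw [Nat.shiftRight_eq_div_pow, pow_one]; omega
    have hM1 : 1 ≤ M := Nat.one_le_two_pow
    rw [hsr, foldl_set_range _ M x (by omega)]
    have hlen2 : ((List.range M).map (fun i => x.getD (i <<< 1) 0) ++ List.drop M x).length = n := by
      simp; omega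
    rw [foldl_set_range' _ (n - M) M _ (by rw [hlen2]; omega)]
    rw [List.take_left' (by simp)]
    rw [List.drop_eq_nil_of_le (by rw [hlen2]; omega), List.append_nil]
    have hpow : 2 ^ (k+1) = 2 * M := by rw [hM, pow_succ]; ring
    have he : (List.range M).map (fun i => x.getD (i <<< 1) 0) = evensOf x := by
      unfold evensOf
      have h1 : (x.length + 1) / 2 = M := by omega
      rw [h1]
      apply List.map_congr_left
      intro i _
      congr 1
    have ho : (List.range' M (n - M)).map
        (fun i => x.getD ((i <<< 1 ||| 1) &&& (n - 1)) 0) = oddsOf x := by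
      unfold oddsOf
      have h2 : x.length / 2 = M := by omega
      have hodd : n - M = M := by omega
      rw [hodd, h2, List.range'_eq_map_range, List.map_map]
      apply List.map_congr_left
      intro j hj
      have hj' : j < M := List.mem_range.mp hj
      simp only [Function.comp]
      congr 1
      rw [Nat.shiftLeft_eq, pow_one, or_one, hn, Nat.and_two_pow_sub_one_eq_mod]
      rw [show (M + j) * 2 + 1 = 2 ^ (k+1) + (2 * j + 1) by omega, Nat.add_mod_left]
      exact Nat.mod_eq_of_lt (by omega)
    rw [he, ho]

-- ===== VERDICT (by name: the statement is the Claim_ definition above) =====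
theorem naive_even_odd_spec : Claim_equal_naive_even_odd := by
  intro x _ hpre
  obtain ⟨k, _, hn⟩ := hpre
  unfold Spec_naive_even_odd
  rw [A_eq x k hn, alt_eq]
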